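-- pv_equiv track=rewrite | github.com/bsuman/jobrelatred | Codewars/fishinpond.py | eatallfish
-- ===== SOURCE A (Python) =====
-- def eatfish(mysize, threshold, mylist):
--     eatsize = 0
--     #if threshold < mysize:
--         #eatsize = threshold
--     #else:
--     eatsize = mysize
--
--     if eatsize > 9:
--         eatsize = 9
--
--     while eatsize > 0:
--         if mylist[eatsize] > 0:
--             mylist[eatsize] = mylist[eatsize] -1
--             return eatsize
--         eatsize = eatsize - 1
--     return 0
--
-- def eatallfish(mylist, edible):
--     mysize = 1
--     threshold = 4 * mysize
--     fishtoeat= True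
--     while fishtoeat:
--         eatsize = eatfish(mysize, threshold, mylist)
--         if eatsize == 0:
--             return mysize
--         threshold = threshold - eatsize
--         if threshold <= 0:
--             mysize = mysize + 1
--             threshold = 4 * mysize + threshold
-- ===== SOURCE B (Python) =====
-- def eatallfish(mylist, edible):
--     # Closed-form: final size is the least k >= 1 whose cumulative edible mass
--     # (sum of i*count_i over sizes i <= min(k, 9), i < len) is below 2*k*(k+1),
--     # the total threshold mass needed to grow past size k.
--     cap = min(9, len(mylist) - 1)
--     total = 0
--     k = 1
--     while k <= cap:
--         c = mylist[k]
--         if c > 0: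
--             total += k * c
--         if total < 2 * k * (k + 1):
--             return k
--         k += 1
--     while 2 * k * (k + 1) <= total:
--         k += 1
--     return k
-- ===== Notes on version B (the rewrite author's own statement) =====
-- stated objective: faster
-- what changed: B replaces A's one-fish-per-iteration eating simulation by a single prefix-mass scan: the final size is the least k whose cumulative edible mass (sum of i*count_i over sizes i <= min(k,9)) falls below the cumulative threshold 2*k*(k+1), so no fish list is ever mutated or iterated per fish.
import Mathlib
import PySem

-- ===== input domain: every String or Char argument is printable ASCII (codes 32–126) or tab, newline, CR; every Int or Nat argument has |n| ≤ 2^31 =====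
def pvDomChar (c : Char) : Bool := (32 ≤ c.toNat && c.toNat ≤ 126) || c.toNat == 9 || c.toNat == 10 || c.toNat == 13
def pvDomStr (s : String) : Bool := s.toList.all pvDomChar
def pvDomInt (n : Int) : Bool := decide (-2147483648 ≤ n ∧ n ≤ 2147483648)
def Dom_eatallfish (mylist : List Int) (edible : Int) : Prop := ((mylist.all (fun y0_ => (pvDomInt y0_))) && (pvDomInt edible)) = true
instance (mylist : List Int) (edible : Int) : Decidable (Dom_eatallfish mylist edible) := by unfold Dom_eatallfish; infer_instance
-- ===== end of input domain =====

-- B replaces A's one-fish-at-a-time simulation by a prefix-mass scan (faster in a timing run).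
-- A mutates `mylist` in place (decrements counts); B does not — the equivalence proved here is about the return value only.

-- ===== PORT A =====

-- measure used only for termination of the A-port: total positive fish count
def pvMu (l : List Int) : Nat := (l.map Int.toNat).sum

-- the `while eatsize > 0` scan of `eatfish`, recursing on eatsize (a Nat, counting down)
def eatfishLoop : List Int → Nat → Int × List Int
  | l, 0 => (0, l)
  | l, n+1 =>
    match PySem.List.pyGet? l ((n+1 : Nat) : Int) with
    | some v =>
        if v > 0 then (((n+1 : Nat) : Int), PySem.List.pySetD l ((n+1 : Nat) : Int) (v - 1))
        else eatfishLoop l n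
    | none => (0, l)   -- IndexError in Python; outside Pre_ (never reached inside it)

def eatfish (mysize threshold : Int) (mylist : List Int) : Int × List Int :=
  let eatsize := mysize
  let eatsize := if eatsize > 9 then (9 : Int) else eatsize
  eatfishLoop mylist eatsize.toNat

lemma pvMu_set_lt : ∀ (l : List Int) (e : Nat), e < l.length → 0 < l.getD e 0 →
    pvMu (l.set e (l.getD e 0 - 1)) < pvMu l
  | [], e, h, _ => absurd h (by simp)
  | a :: tl, 0, _, hv => by
      simp only [List.getD_cons_zero] at hv ⊢
      simp only [List.set_cons_zero, pvMu, List.map_cons, List.sum_cons]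
      omega
  | a :: tl, n+1, he, hv => by
      simp only [List.getD_cons_succ] at hv ⊢
      simp only [List.set_cons_succ, pvMu, List.map_cons, List.sum_cons]
      have := pvMu_set_lt tl n (by simpa using he) hv
      simp only [pvMu] at this
      omega

lemma eatfishLoop_mu : ∀ (n : Nat) (l : List Int) (e : Int) (l' : List Int),
    eatfishLoop l n = (e, l') → e ≠ 0 → pvMu l' < pvMu l := by
  intro n
  induction n with
  | zero => intro l e l' h he; simp [eatfishLoop] at h; exact absurd h.1.symm he
  | succ n ih =>
    intro l e l' h he
    rw [eatfishLoop] at h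
    rcases hg : PySem.List.pyGet? l ((n+1 : Nat) : Int) with _ | v
    · rw [hg] at h; dsimp only at h
      simp at h; exact absurd h.1.symm he
    · rw [hg] at h; dsimp only at h
      rw [PySem.List.pyGet?_natCast] at hg
      obtain ⟨hlen, hv_el⟩ := List.getElem?_eq_some_iff.mp hg
      have hvv : l.getD (n+1) 0 = v := by
        rw [List.getD_eq_getElem?_getD, hg]; rfl
      by_cases hv : v > 0
      · rw [if_pos hv] at h
        have hset : PySem.List.pySetD l ((n+1 : Nat) : Int) (v - 1) = l.set (n+1) (v - 1) :=
          PySem.List.pySetD_natCast l (n+1) (v-1)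
        rw [hset] at h
        have := pvMu_set_lt l (n+1) hlen (by omega)
        rw [hvv] at this
        obtain ⟨-, h2⟩ := Prod.mk.injEq .. ▸ h
        rw [← h2]; exact this
      · rw [if_neg hv] at h; exact ih l e l' h he

lemma eatfish_mu (m t : Int) (l : List Int) (e : Int) (l' : List Int) :
    eatfish m t l = (e, l') → e ≠ 0 → pvMu l' < pvMu l := by
  intro h he
  exact eatfishLoop_mu _ l e l' h he

def eatallLoop (mylist : List Int) (mysize threshold : Int) : Int :=
  let r := eatfish mysize threshold mylist
  if r.1 = 0 then mysize
  else
    let threshold' := threshold - r.1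
    if threshold' ≤ 0 then eatallLoop r.2 (mysize + 1) (4 * (mysize + 1) + threshold')
    else eatallLoop r.2 mysize threshold'
termination_by pvMu mylist
decreasing_by
  · exact eatfish_mu mysize threshold mylist (eatfish mysize threshold mylist).1
      (eatfish mysize threshold mylist).2 rfl (by assumption)
  · exact eatfish_mu mysize threshold mylist (eatfish mysize threshold mylist).1
      (eatfish mysize threshold mylist).2 rfl (by assumption)

def eatallfish (mylist : List Int) (edible : Int) : Int :=
  let mysize : Int := 1
  let threshold : Int := 4 * mysize
  eatallLoop mylist mysize threshold

-- ===== PORT B =====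

-- second while-loop of Source B: grow k while the fixed total still covers the threshold mass
def bLoop2 (total : Int) (k : Nat) : Int :=
  if 2 * (k : Int) * (k + 1) ≤ total then bLoop2 total (k + 1) else (k : Int)
termination_by (total + 1 - 2 * (k : Int) * (k + 1)).toNat
decreasing_by
  have h2 : 2 * ((k : Int) + 1) * ((k : Int) + 1 + 1) = 2 * (k : Int) * (k + 1) + 4 * ((k : Int) + 1) := by ring
  push_cast
  omega

-- first while-loop of Source B: accumulate prefix mass while k ≤ cap
def bLoop1 (l : List Int) (cap : Int) (k : Nat) (total : Int) : Int :=
  if (k : Int) ≤ cap then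
    let c := l.getD k 0   -- mylist[k]; exact: 1 ≤ k ≤ cap < len(mylist) whenever this branch runs
    let total' := if c > 0 then total + (k : Int) * c else total
    if total' < 2 * (k : Int) * (k + 1) then (k : Int) else bLoop1 l cap (k + 1) total'
  else bLoop2 total k
termination_by (cap + 1 - (k : Int)).toNat
decreasing_by
  push_cast
  omega

def eatallfish_alt (mylist : List Int) (edible : Int) : Int :=
  let cap : Int := min 9 ((mylist.length : Int) - 1)
  bLoop1 mylist cap 1 0

-- ===== PRECONDITION & SPEC =====

-- prefix edible mass: sum of i * max(count_i, 0) over sizes 1 ≤ i ≤ min(j, 9), i < length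
def pm (l : List Int) (j : Nat) : Int :=
  ∑ i ∈ Finset.range (min (j + 1) (min 10 l.length)), (i : Int) * max (l.getD i 0) 0

-- Pre_ excludes exactly the inputs on which A raises IndexError: A crashes iff the pond is
-- shorter than 10 and the fish never gets stuck at a size below the list length.
def Pre_eatallfish (mylist : List Int) (edible : Int) : Prop :=
  10 ≤ mylist.length ∨ ∃ j, j < mylist.length ∧ 1 ≤ j ∧ pm mylist j < 2 * (j : Int) * (j + 1)

instance (mylist : List Int) (edible : Int) : Decidable (Pre_eatallfish mylist edible) := by
  unfold Pre_eatallfish; infer_instance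

def pvWitness_eatallfish : List Int × Int := ([0, 1], 0)

def Spec_eatallfish (mylist : List Int) (edible : Int) (out : Int) : Prop := out = eatallfish_alt mylist edible
instance (mylist : List Int) (edible : Int) (out : Int) : Decidable (Spec_eatallfish mylist edible out) := by unfold Spec_eatallfish; infer_instance

-- ===== CLAIM (what is proved, stated in full; the proofs are below) =====
def Claim_equal_eatallfish : Prop := ∀ (mylist : List Int) (edible : Int), Dom_eatallfish mylist edible → Pre_eatallfish mylist edible → Spec_eatallfish mylist edible (eatallfish mylist edible)

-- ===== LEMMAS AND PROOFS =====

-- ---- facts about pm ----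

lemma pm_term_nonneg (l : List Int) (i : Nat) : (0:Int) ≤ (i : Int) * max (l.getD i 0) 0 :=
  mul_nonneg (Int.natCast_nonneg i) (le_max_right _ _)

lemma pm_le_9 (l : List Int) (j : Nat) : pm l j ≤ pm l 9 := by
  unfold pm
  apply Finset.sum_le_sum_of_subset_of_nonneg
  · intro i hi
    rw [Finset.mem_range] at hi ⊢
    omega
  · intro i _ _; exact pm_term_nonneg l i

lemma pm_zero (l : List Int) : pm l 0 = 0 := by
  unfold pm
  apply Finset.sum_eq_zero
  intro i hi
  rw [Finset.mem_range] at hi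
  have : i = 0 := by omega
  simp [this]

lemma pm_succ (l : List Int) (j : Nat) (h9 : j + 1 ≤ 9) (hL : j + 1 < l.length) :
    pm l (j + 1) = pm l j + ((j + 1 : Nat) : Int) * max (l.getD (j + 1) 0) 0 := by
  unfold pm
  have h1 : min (j + 1 + 1) (min 10 l.length) = (j + 1) + 1 := by omega
  have h2 : min (j + 1) (min 10 l.length) = j + 1 := by omega
  rw [h1, h2, Finset.sum_range_succ]

lemma pm_const (l : List Int) (j : Nat) (h : 9 ≤ j ∨ l.length ≤ j + 1) : pm l (j + 1) = pm l j := by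
  unfold pm
  have : min (j + 1 + 1) (min 10 l.length) = min (j + 1) (min 10 l.length) := by omega
  rw [this]

lemma pm_stable (l : List Int) (j : Nat) (h : 9 ≤ j ∨ l.length ≤ j + 1) :
    ∀ d, pm l (j + d) = pm l j := by
  intro d
  induction d with
  | zero => rfl
  | succ d ih =>
    have : j + (d + 1) = (j + d) + 1 := by omega
    rw [this, pm_const l (j + d) (by omega), ih]

lemma pm_ge_single (l : List Int) (e j : Nat) (h1 : 1 ≤ e) (he : e ≤ j) (h9 : e ≤ 9)
    (hL : e < l.length) (hp : 0 < l.getD e 0) : (e : Int) ≤ pm l j := by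
  have hmem : e ∈ Finset.range (min (j + 1) (min 10 l.length)) := by
    rw [Finset.mem_range]; omega
  have hterm : (e : Int) ≤ (e : Int) * max (l.getD e 0) 0 := by
    have hmax : (1:Int) ≤ max (l.getD e 0) 0 := le_max_of_le_left (by omega)
    nlinarith [Int.natCast_nonneg e]
  calc (e : Int) ≤ (e : Int) * max (l.getD e 0) 0 := hterm
    _ ≤ pm l j := Finset.single_le_sum (fun i _ => pm_term_nonneg l i) hmem

lemma getD_set' (l : List Int) (e i : Nat) (x : Int) (he : e < l.length) :
    (l.set e x).getD i 0 = if i = e then x else l.getD i 0 := by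
  by_cases h : i = e
  · subst h
    rw [if_pos rfl, List.getD_eq_getElem?_getD, List.getElem?_set_self (by omega)]
    rfl
  · rw [if_neg h, List.getD_eq_getElem?_getD, List.getElem?_set_ne (fun hc => h hc.symm),
        List.getD_eq_getElem?_getD]

lemma pm_set (l : List Int) (e j : Nat) (h1 : 1 ≤ e) (h9 : e ≤ 9) (hL : e < l.length)
    (hv : 0 < l.getD e 0) (he : e ≤ j) :
    pm (l.set e (l.getD e 0 - 1)) j = pm l j - e := by
  unfold pm
  rw [List.length_set]
  have hem : e ∈ Finset.range (min (j + 1) (min 10 l.length)) := by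
    rw [Finset.mem_range]; omega
  have hcong : ∀ i ∈ Finset.range (min (j + 1) (min 10 l.length)),
      (i : Int) * max ((l.set e (l.getD e 0 - 1)).getD i 0) 0
        = (i : Int) * max (l.getD i 0) 0 + (if i = e then -(e : Int) else 0) := by
    intro i _
    rw [getD_set' l e i _ hL]
    by_cases h : i = e
    · subst h
      rw [if_pos rfl, if_pos rfl]
      rw [max_eq_left (by omega), max_eq_left (by omega)]
      ring
    · rw [if_neg h, if_neg h, add_zero]
  rw [Finset.sum_congr rfl hcong, Finset.sum_add_distrib, Finset.sum_ite_eq' _ e fun _ => -(e:Int)]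
  rw [if_pos hem]
  ring

lemma pm_eq_zero (l : List Int) (k : Nat)
    (h : ∀ i, 1 ≤ i → i ≤ min k 9 → l.getD i 0 ≤ 0) : pm l k = 0 := by
  unfold pm
  apply Finset.sum_eq_zero
  intro i hi
  rw [Finset.mem_range] at hi
  rcases Nat.eq_zero_or_pos i with h0 | hpos
  · simp [h0]
  · have hle : l.getD i 0 ≤ 0 := h i hpos (by omega)
    rw [max_eq_right hle, mul_zero]

-- common spec: least level k' ≥ k at which the remaining mass is below the remaining threshold
def solveGen (l : List Int) (k : Nat) (t : Int) : Int :=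
  if pm l k < t then (k : Int) else solveGen l (k + 1) (t + 4 * ((k : Int) + 1))
termination_by (pm l 9 + 1 - t).toNat
decreasing_by
  have h1 : ¬ pm l k < t := by assumption
  have h2 : pm l k ≤ pm l 9 := pm_le_9 l k
  have hk : (0 : Int) ≤ (k : Int) := Int.natCast_nonneg k
  omega

-- decrementing an edible entry of size e commutes with lowering the threshold by e
lemma solveGen_set (l : List Int) (e : Nat) (h1 : 1 ≤ e) (h9 : e ≤ 9) (hL : e < l.length)
    (hv : 0 < l.getD e 0) :
    ∀ (N k : Nat) (t : Int), (pm l 9 + 1 - t).toNat < N → e ≤ k →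
      solveGen (l.set e (l.getD e 0 - 1)) k (t - e) = solveGen l k t := by
  intro N
  induction N with
  | zero => intro k t h; omega
  | succ N ih =>
    intro k t hN hek
    conv_rhs => rw [solveGen]
    rw [solveGen, pm_set l e k h1 h9 hL hv hek]
    by_cases hc : pm l k < t
    · rw [if_pos (by omega), if_pos hc]
    · rw [if_neg (by omega), if_neg hc]
      have harg : t - e + 4 * ((k:Int) + 1) = (t + 4 * ((k:Int) + 1)) - e := by ring
      rw [harg]
      have h2 : pm l k ≤ pm l 9 := pm_le_9 l k
      have hk0 : (0 : Int) ≤ (k : Int) := Int.natCast_nonneg k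
      exact ih (k + 1) (t + 4 * ((k:Int) + 1)) (by omega) (by omega)

-- characterization of the eatfish scan (indices all in range)
lemma eatfishLoop_spec (l : List Int) : ∀ (n : Nat), n < l.length →
    (eatfishLoop l n = (0, l) ∧ ∀ i, 1 ≤ i → i ≤ n → l.getD i 0 ≤ 0)
    ∨ (∃ e : Nat, 1 ≤ e ∧ e ≤ n ∧ 0 < l.getD e 0 ∧
        eatfishLoop l n = ((e : Int), l.set e (l.getD e 0 - 1))) := by
  intro n
  induction n with
  | zero => intro _; left; exact ⟨rfl, fun i hi1 hi2 => by omega⟩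
  | succ n ih =>
    intro hlen
    have hg : PySem.List.pyGet? l ((n + 1 : Nat) : Int) = some (l.getD (n + 1) 0) := by
      rw [PySem.List.pyGet?_natCast, List.getElem?_eq_getElem hlen, List.getD_eq_getElem l 0 hlen]
    by_cases hv : l.getD (n + 1) 0 > 0
    · right
      refine ⟨n + 1, by omega, le_refl _, hv, ?_⟩
      rw [eatfishLoop, hg]
      dsimp only
      rw [if_pos hv, PySem.List.pySetD_natCast]
    · rcases ih (by omega) with ⟨h0, hall⟩ | ⟨e, he1, he2, he3, he4⟩
      · left
        constructor
        · rw [eatfishLoop, hg]; dsimp only; rw [if_neg hv]; exact h0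
        · intro i hi1 hi2
          rcases Nat.lt_or_ge i (n + 1) with hlt | hge
          · exact hall i hi1 (by omega)
          · have : i = n + 1 := by omega
            rw [this]; omega
      · right
        refine ⟨e, he1, by omega, he3, ?_⟩
        rw [eatfishLoop, hg]; dsimp only; rw [if_neg hv]; exact he4

-- ---- the A side equals solveGen ----

lemma eatfish_eq (k : Nat) (t : Int) (l : List Int) :
    eatfish ((k : Nat) : Int) t l = eatfishLoop l (min k 9) := by
  show eatfishLoop l (if ((k : Nat) : Int) > 9 then (9 : Int) else ((k : Nat) : Int)).toNat
      = eatfishLoop l (min k 9)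
  congr 1
  split_ifs with h
  · omega
  · omega

lemma eatallLoop_eq (N : Nat) : ∀ (l : List Int) (k : Nat) (t : Int), pvMu l < N → 1 ≤ k → 0 < t →
    (10 ≤ l.length ∨ ∃ j : Nat, k ≤ j ∧ j < l.length ∧
        pm l j + 2 * (k : Int) * ((k : Int) + 1) < t + 2 * (j : Int) * ((j : Int) + 1)) →
    eatallLoop l ((k : Nat) : Int) t = solveGen l k t := by
  induction N with
  | zero => intro l k t h; omega
  | succ N ih =>
    intro l k t hN hk ht hsafe
    have hmin : min k 9 < l.length := by
      have h1 := Nat.min_le_right k 9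
      have h2 := Nat.min_le_left k 9
      rcases hsafe with h10 | ⟨j, hj1, hj2, _⟩
      · omega
      · omega
    rw [eatallLoop]
    simp only [eatfish_eq k t l]
    rcases eatfishLoop_spec l (min k 9) hmin with ⟨hef, hall⟩ | ⟨e, he1, he2, hv, hef⟩
    · -- no edible fish: A returns k, and pm l k = 0 < t
      simp only [hef]
      rw [solveGen, if_pos (show pm l k < t by rw [pm_eq_zero l k hall]; exact ht)]
      simp
    · -- a fish of size e is eaten
      have hePos : ¬ ((e : Int)) = 0 := by
        simp only [Int.natCast_eq_zero]; omega
      simp only [hef, if_neg hePos]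
      have heL : e < l.length := by omega
      have hpmk : (e : Int) ≤ pm l k := pm_ge_single l e k he1 (by omega) (by omega) heL hv
      have hek : (e : Int) ≤ (k : Int) := by exact_mod_cast Nat.le_trans he2 (Nat.min_le_left _ _)
      have hMu : pvMu (l.set e (l.getD e 0 - 1)) < pvMu l := pvMu_set_lt l e heL hv
      by_cases hcross : t - (e : Int) ≤ 0
      · simp only [if_pos hcross]
        -- the size grows: k → k+1
        have hcast : ((k : Int) + 1) = (((k + 1 : Nat)) : Int) := by push_cast; ring
        rw [hcast]
        have hring : 2 * (((k+1 : Nat)) : Int) * ((((k+1 : Nat)) : Int) + 1)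
            = 2 * (k : Int) * ((k : Int) + 1) + 4 * ((k : Int) + 1) := by push_cast; ring
        have hsafe' : 10 ≤ (l.set e (l.getD e 0 - 1)).length ∨ ∃ j : Nat, (k+1) ≤ j ∧
            j < (l.set e (l.getD e 0 - 1)).length ∧
            pm (l.set e (l.getD e 0 - 1)) j + 2 * ((k+1 : Nat) : Int) * (((k+1 : Nat) : Int) + 1)
              < (4 * (((k+1 : Nat)) : Int) + (t - (e : Int))) + 2 * (j : Int) * ((j : Int) + 1) := by
          rcases hsafe with h10 | ⟨j, hj1, hj2, hj3⟩
          · left; rw [List.length_set]; exact h10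
          · right
            have hjk : k + 1 ≤ j := by
              rcases Nat.lt_or_ge j (k+1) with hlt | hge
              · exfalso
                have : j = k := by omega
                subst this
                linarith
              · exact hge
            refine ⟨j, hjk, by rw [List.length_set]; omega, ?_⟩
            rw [pm_set l e j he1 (by omega) heL hv (by omega), hring]
            push_cast
            linarith
        have hIH := ih (l.set e (l.getD e 0 - 1)) (k+1) (4 * (((k+1 : Nat)) : Int) + (t - (e : Int)))
          (by omega) (by omega) (by push_cast; omega) hsafe'
        rw [show (4 * (((k+1 : Nat)) : Int) + (t - (e : Int)))
              = 4 * ((((k+1 : Nat))) : Int) + (t - (e : Int)) from rfl] at hIH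
        rw [hIH]
        -- now match with solveGen l k t
        conv_rhs => rw [solveGen]
        rw [if_neg (by omega)]
        have harg : 4 * (((k+1 : Nat)) : Int) + (t - (e : Int))
            = (t + 4 * ((k : Int) + 1)) - (e : Int) := by push_cast; ring
        rw [harg]
        exact solveGen_set l e he1 (by omega) heL hv
          ((pm l 9 + 1 - (t + 4 * ((k : Int) + 1))).toNat + 1) (k+1)
          (t + 4 * ((k : Int) + 1)) (by omega) (by omega)
      · simp only [if_neg hcross]
        have hsafe' : 10 ≤ (l.set e (l.getD e 0 - 1)).length ∨ ∃ j : Nat, k ≤ j ∧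
            j < (l.set e (l.getD e 0 - 1)).length ∧
            pm (l.set e (l.getD e 0 - 1)) j + 2 * (k : Int) * ((k : Int) + 1)
              < (t - (e : Int)) + 2 * (j : Int) * ((j : Int) + 1) := by
          rcases hsafe with h10 | ⟨j, hj1, hj2, hj3⟩
          · left; rw [List.length_set]; exact h10
          · right
            refine ⟨j, hj1, by rw [List.length_set]; omega, ?_⟩
            rw [pm_set l e j he1 (by omega) heL hv (by omega)]
            linarith
        have hIH := ih (l.set e (l.getD e 0 - 1)) k (t - (e : Int))
          (by omega) hk (by omega) hsafe'
        rw [hIH]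
        exact solveGen_set l e he1 (by omega) heL hv
          ((pm l 9 + 1 - t).toNat + 1) k t (by omega) (by omega)

-- ---- the B side equals solveGen ----

lemma bLoop2_eq (l : List Int) : ∀ (N : Nat) (k : Nat) (total : Int),
    (total + 1 - 2 * (k : Int) * ((k : Int) + 1)).toNat < N → 1 ≤ k →
    (∀ j, k ≤ j → pm l j = total) →
    bLoop2 total k = solveGen l k (2 * (k : Int) * ((k : Int) + 1)) := by
  intro N
  induction N with
  | zero => intro k total h; omega
  | succ N ih =>
    intro k total hN hk hpm
    rw [bLoop2, solveGen, hpm k (le_refl k)]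
    by_cases hc : 2 * (k : Int) * ((k : Int) + 1) ≤ total
    · rw [if_pos hc, if_neg (by omega)]
      have hring : 2 * ((k+1 : Nat) : Int) * (((k+1 : Nat) : Int) + 1)
          = 2 * (k : Int) * ((k : Int) + 1) + 4 * ((k : Int) + 1) := by push_cast; ring
      have hIH := ih (k+1) total (by have hk0 : (0:Int) ≤ (k:Int) := Int.natCast_nonneg k
                                     rw [hring]; omega)
        (by omega) (fun j hj => hpm j (by omega))
      rw [hIH, hring]
    · rw [if_neg hc, if_pos (by omega)]

lemma bLoop1_eq (l : List Int) : ∀ (M : Nat) (k : Nat) (total : Int),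
    ((min 9 ((l.length : Int) - 1)) + 1 - (k : Int)).toNat < M → 1 ≤ k → total = pm l (k - 1) →
    bLoop1 l (min 9 ((l.length : Int) - 1)) k total = solveGen l k (2 * (k : Int) * ((k : Int) + 1)) := by
  intro M
  induction M with
  | zero => intro k total h; omega
  | succ M ih =>
    intro k total hM hk htot
    rw [bLoop1]
    by_cases hc : (k : Int) ≤ min 9 ((l.length : Int) - 1)
    · rw [if_pos hc]
      have hk9 : k ≤ 9 := by omega
      have hkL : k < l.length := by omega
      have hsub : k - 1 + 1 = k := by omega
      have hstep : (if l.getD k 0 > 0 then total + (k : Int) * l.getD k 0 else total) = pm l k := by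
        have hpm : pm l k = pm l (k - 1) + ((k : Nat) : Int) * max (l.getD k 0) 0 := by
          have := pm_succ l (k - 1) (by omega) (by omega)
          rw [hsub] at this
          exact this
        by_cases hpos : l.getD k 0 > 0
        · rw [if_pos hpos, hpm, max_eq_left (by omega), htot]
        · rw [if_neg hpos, hpm, max_eq_right (by omega), htot]; ring
      simp only [hstep]
      by_cases hret : pm l k < 2 * (k : Int) * ((k : Int) + 1)
      · rw [if_pos hret, solveGen, if_pos hret]
      · rw [if_neg hret, solveGen, if_neg hret]
        have hring : 2 * ((k+1 : Nat) : Int) * (((k+1 : Nat) : Int) + 1)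
            = 2 * (k : Int) * ((k : Int) + 1) + 4 * ((k : Int) + 1) := by push_cast; ring
        have hIH := ih (k+1) (pm l k) (by push_cast; omega) (by omega)
          (by have : k + 1 - 1 = k := by omega
              rw [this])
        rw [hIH, hring]
    · rw [if_neg hc]
      have hconst : 9 ≤ k - 1 ∨ l.length ≤ (k - 1) + 1 := by omega
      have hall : ∀ j, k ≤ j → pm l j = total := by
        intro j hj
        have : j = (k - 1) + (j - (k - 1)) := by omega
        rw [this, pm_stable l (k - 1) hconst, htot]
      exact bLoop2_eq l ((total + 1 - 2 * (k : Int) * ((k : Int) + 1)).toNat + 1) k total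
        (by omega) hk hall

theorem eatallfish_spec : Claim_equal_eatallfish := by
  intro l e _ hPre
  unfold Spec_eatallfish
  have hL2 : 2 ≤ l.length := by
    rcases hPre with h10 | ⟨j, hj1, hj2, _⟩
    · omega
    · omega
  have hA : eatallfish l e = solveGen l 1 4 := by
    show eatallLoop l 1 (4 * 1) = solveGen l 1 4
    rw [show (4 * 1 : Int) = 4 from by norm_num]
    have hsafe : 10 ≤ l.length ∨ ∃ j : Nat, 1 ≤ j ∧ j < l.length ∧
        pm l j + 2 * ((1:Nat) : Int) * (((1:Nat) : Int) + 1) < 4 + 2 * (j : Int) * ((j : Int) + 1) := by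
      rcases hPre with h10 | ⟨j, hj1, hj2, hj3⟩
      · left; exact h10
      · right
        refine ⟨j, hj2, hj1, ?_⟩
        push_cast
        linarith
    exact eatallLoop_eq (pvMu l + 1) l 1 4 (by omega) (by omega) (by omega) hsafe
  have hB : eatallfish_alt l e = solveGen l 1 4 := by
    show bLoop1 l (min 9 ((l.length : Int) - 1)) 1 0 = solveGen l 1 4
    have := bLoop1_eq l ((min 9 ((l.length : Int) - 1) + 1 - 1).toNat + 1) 1 0
      (by omega) (by omega) (by rw [show (1 : Nat) - 1 = 0 from rfl, pm_zero])
    rw [this]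
    norm_num
  rw [hA, hB]
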